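-- pv_equiv track=rewrite | github.com/jakuberan/AoC-2021 | day15_12.py | decrease_key
-- ===== SOURCE A (Python) =====
-- def swap(len_flat, status, i, j):
--     """
--     Swaps elements at selected positions
--     """
--     len_temp = len_flat[i]
--     sts_temp = status[i]
--     len_flat[i] = len_flat[j]
--     status[i] = status[j]
--     len_flat[j] = len_temp
--     status[j] = sts_temp
--     return len_flat, status
--
-- def decrease_key(len_flat, status, i):
--     """
--     Moves lenght up in the heap
--     """
--     if i == 0:
--         return len_flat, status
--     elif len_flat[i] < len_flat[(i-1)//2]:
--         len_flat, status = swap(len_flat, status, i, (i-1)//2)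
--         return decrease_key(len_flat, status, (i-1)//2)
--     else:
--         return len_flat, status
-- ===== SOURCE B (Python) =====
-- def decrease_key(len_flat, status, i):
--     """
--     Moves length up in the heap (iterative sift-up: explicit while-loop
--     instead of tail recursion, with inlined tuple swaps)
--     """
--     while i != 0:
--         j = (i - 1) // 2
--         if not (len_flat[i] < len_flat[j]):
--             break
--         len_flat[i], len_flat[j] = len_flat[j], len_flat[i]
--         status[i], status[j] = status[j], status[i]
--         i = j
--     return len_flat, status
-- ===== Notes on version B (the rewrite author's own statement) =====
-- stated objective: alternative
-- what changed: The tail-recursive sift-up with a separate swap helper is rewritten as an explicit while-loop that inlines the two swaps as tuple assignments and walks i up to the root in place.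
-- outside the precondition, e.g. on decrease_key([1, 2], [5], 1): A returns ([1, 2], [5]), B returns ([1, 2], [5])
import Mathlib
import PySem

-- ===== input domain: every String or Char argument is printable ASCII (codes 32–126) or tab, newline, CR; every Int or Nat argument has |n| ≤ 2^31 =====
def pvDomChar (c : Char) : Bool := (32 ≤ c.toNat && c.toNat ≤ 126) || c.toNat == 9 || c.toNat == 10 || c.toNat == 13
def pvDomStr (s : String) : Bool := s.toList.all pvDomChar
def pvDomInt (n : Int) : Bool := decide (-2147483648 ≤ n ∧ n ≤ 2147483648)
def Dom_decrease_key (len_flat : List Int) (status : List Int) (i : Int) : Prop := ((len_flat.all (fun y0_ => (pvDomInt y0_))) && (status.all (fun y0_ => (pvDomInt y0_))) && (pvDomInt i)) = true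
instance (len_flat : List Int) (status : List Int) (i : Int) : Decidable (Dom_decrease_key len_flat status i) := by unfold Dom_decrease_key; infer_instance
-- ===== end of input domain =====

-- B rewrites A's tail recursion (with its swap helper) as an explicit while-loop with inlined
-- tuple swaps; both mutate the two lists in place in Python, and the equivalence is about the
-- returned pair (which holds the same final contents in both).

-- termination measure fact, cited by both ports' decreasing_by
theorem pv_parent_natAbs_lt (i : Int) (h0 : i ≠ 0) (h1 : i ≠ -1) (h2 : i ≠ -2) :
    (PySem.Int.floordiv (i - 1) 2).natAbs < i.natAbs := by
  rw [PySem.Int.floordiv_eq_ediv_of_pos (by omega)]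
  omega

-- for i = -1 / i = -2 the "parent" index equals i itself, so the strict comparison
-- len_flat[i] < len_flat[parent] can never hold; cited by both decreasing_by proofs
theorem pv_parent_self_no_lt (len_flat : List Int) (i : Int) (hi : i = -1 ∨ i = -2)
    {a b : Int} (ha : PySem.List.pyGet? len_flat i = some a)
    (hb : PySem.List.pyGet? len_flat (PySem.Int.floordiv (i - 1) 2) = some b) :
    ¬ a < b := by
  have hp : PySem.Int.floordiv (i - 1) 2 = i := by
    rcases hi with h | h <;> subst h <;> decide
  rw [hp, ha] at hb
  cases hb
  exact lt_irrefl a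

-- ===== PORT A =====
-- the 'swap' helper of A: the six sequenced reads/writes, none = IndexError
def pvSwap (len_flat : List Int) (status : List Int) (i : Int) (j : Int) :
    Option (List Int × List Int) := do
  let len_temp ← PySem.List.pyGet? len_flat i
  let sts_temp ← PySem.List.pyGet? status i
  let lj ← PySem.List.pyGet? len_flat j
  let len_flat1 ← PySem.List.pySet? len_flat i lj
  let sj ← PySem.List.pyGet? status j
  let status1 ← PySem.List.pySet? status i sj
  let len_flat2 ← PySem.List.pySet? len_flat1 j len_temp
  let status2 ← PySem.List.pySet? status1 j sts_temp
  return (len_flat2, status2)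

def decrease_key (len_flat : List Int) (status : List Int) (i : Int) : List Int × List Int :=
  if h0 : i = 0 then
    (len_flat, status)
  else
    match ha : PySem.List.pyGet? len_flat i,
          hb : PySem.List.pyGet? len_flat (PySem.Int.floordiv (i - 1) 2) with
    | some a, some b =>
      if hab : a < b then
        match pvSwap len_flat status i (PySem.Int.floordiv (i - 1) 2) with
        | some (lf, st) => decrease_key lf st (PySem.Int.floordiv (i - 1) 2)
        | none => (len_flat, status)   -- IndexError inside swap; outside Pre_
      else
        (len_flat, status)
    | _, _ => (len_flat, status)       -- IndexError on the comparison; outside Pre_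
termination_by i.natAbs
decreasing_by
  by_cases h1 : i = -1
  · exact absurd hab (pv_parent_self_no_lt len_flat i (Or.inl h1) ha hb)
  · by_cases h2 : i = -2
    · exact absurd hab (pv_parent_self_no_lt len_flat i (Or.inr h2) ha hb)
    · exact pv_parent_natAbs_lt i h0 h1 h2

-- ===== PORT B =====
-- the while-loop of Source B: state (len_flat, status, i), inlined tuple swaps via pySetD
def pvSiftLoop (len_flat : List Int) (status : List Int) (i : Int) : List Int × List Int :=
  if h0 : i = 0 then
    (len_flat, status)
  else
    let j := PySem.Int.floordiv (i - 1) 2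
    match ha : PySem.List.pyGet? len_flat i with
    | none => (len_flat, status)           -- IndexError on the comparison; outside Pre_
    | some li =>
      match hb : PySem.List.pyGet? len_flat j with
      | none => (len_flat, status)         -- IndexError on the comparison; outside Pre_
      | some lj =>
        if hlt : li < lj then
          -- len_flat[i], len_flat[j] = len_flat[j], len_flat[i]
          let lf' := PySem.List.pySetD (PySem.List.pySetD len_flat i lj) j li
          -- status[i], status[j] = status[j], status[i]
          match PySem.List.pyGet? status i with
          | none => (len_flat, status)     -- IndexError reading status; outside Pre_
          | some si =>
            match PySem.List.pyGet? status j with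
            | none => (len_flat, status)   -- IndexError reading status; outside Pre_
            | some sj =>
              pvSiftLoop lf' (PySem.List.pySetD (PySem.List.pySetD status i sj) j si) j
        else
          (len_flat, status)               -- break
termination_by i.natAbs
decreasing_by
  by_cases h1 : i = -1
  · exact absurd hlt (pv_parent_self_no_lt len_flat i (Or.inl h1) ha hb)
  · by_cases h2 : i = -2
    · exact absurd hlt (pv_parent_self_no_lt len_flat i (Or.inr h2) ha hb)
    · exact pv_parent_natAbs_lt i h0 h1 h2

def decrease_key_alt (len_flat : List Int) (status : List Int) (i : Int) : List Int × List Int :=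
  pvSiftLoop len_flat status i

-- ===== PRECONDITION & SPEC =====
-- Pre_ excludes the inputs where some index on the walk up the heap is out of range for one of
-- the two lists: there A (and B) raise IndexError — except that when status is shorter than
-- len_flat, A can happen to return before ever touching status because the strict comparison
-- fails first; those returning inputs are also excluded (see cites), B returns the same value there.
def Pre_decrease_key (len_flat : List Int) (status : List Int) (i : Int) : Prop :=
  i = 0 ∨ (-(min (len_flat.length : Int) (status.length : Int)) ≤ i ∧
            i < min (len_flat.length : Int) (status.length : Int))
instance (len_flat : List Int) (status : List Int) (i : Int) :
    Decidable (Pre_decrease_key len_flat status i) := by unfold Pre_decrease_key; infer_instance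

def pvWitness_decrease_key : List Int × List Int × Int := ([3, 5, 4, 9, 2], [0, 1, 2, 3, 4], 4)

def Spec_decrease_key (len_flat : List Int) (status : List Int) (i : Int) (out : List Int × List Int) : Prop := out = decrease_key_alt len_flat status i
instance (len_flat : List Int) (status : List Int) (i : Int) (out : List Int × List Int) : Decidable (Spec_decrease_key len_flat status i out) := by unfold Spec_decrease_key; infer_instance

-- ===== CLAIM (what is proved, stated in full; the proofs are below) =====
def Claim_equal_decrease_key : Prop := ∀ (len_flat : List Int) (status : List Int) (i : Int), Dom_decrease_key len_flat status i → Pre_decrease_key len_flat status i → Spec_decrease_key len_flat status i (decrease_key len_flat status i)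

-- ===== LEMMAS AND PROOFS =====


-- a successful read witnesses the index being in range
theorem pv_inRange_of_get {xs : List Int} {i : Int} {a : Int}
    (h : PySem.List.pyGet? xs i = some a) : PySem.Raise.InRange xs.length i := by
  by_contra hc
  rw [← PySem.List.pyGet?_eq_none_iff] at hc
  rw [hc] at h
  cases h

-- an in-range write succeeds and produces the total-form result
theorem pv_pySet?_eq_some {xs : List Int} {i : Int} (v : Int)
    (h : PySem.Raise.InRange xs.length i) :
    PySem.List.pySet? xs i v = some (PySem.List.pySetD xs i v) := by
  cases hx : PySem.List.pySet? xs i v with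
  | none => rw [PySem.List.pySet?_eq_none_iff] at hx; exact absurd h hx
  | some ys => simp [PySem.List.pySetD, hx]

-- what A's swap returns when all four reads succeed: exactly B's two inlined tuple swaps
theorem pv_pvSwap_eq_some {lf st : List Int} {i j a lj si sj : Int}
    (ha : PySem.List.pyGet? lf i = some a) (hlj : PySem.List.pyGet? lf j = some lj)
    (hsi : PySem.List.pyGet? st i = some si) (hsj : PySem.List.pyGet? st j = some sj) :
    pvSwap lf st i j =
      some (PySem.List.pySetD (PySem.List.pySetD lf i lj) j a,
            PySem.List.pySetD (PySem.List.pySetD st i sj) j si) := by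
  have h1 := pv_pySet?_eq_some (xs := lf) lj (pv_inRange_of_get ha)
  have h2 := pv_pySet?_eq_some (xs := st) sj (pv_inRange_of_get hsi)
  have h3 : PySem.Raise.InRange (PySem.List.pySetD lf i lj).length j := by
    rw [PySem.List.length_pySetD]; exact pv_inRange_of_get hlj
  have h4 : PySem.Raise.InRange (PySem.List.pySetD st i sj).length j := by
    rw [PySem.List.length_pySetD]; exact pv_inRange_of_get hsj
  have h5 := pv_pySet?_eq_some (xs := PySem.List.pySetD lf i lj) a h3
  have h6 := pv_pySet?_eq_some (xs := PySem.List.pySetD st i sj) si h4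
  simp [pvSwap, ha, hlj, hsi, hsj, h1, h2, h5, h6]

-- A's swap raises exactly when one of the status reads raises (given the two len reads succeed)
theorem pv_pvSwap_none_left {lf st : List Int} {i j a : Int}
    (ha : PySem.List.pyGet? lf i = some a)
    (hsi : PySem.List.pyGet? st i = none) : pvSwap lf st i j = none := by
  simp [pvSwap, ha, hsi]

theorem pv_pvSwap_none_right {lf st : List Int} {i j a lj si : Int}
    (ha : PySem.List.pyGet? lf i = some a) (hlj : PySem.List.pyGet? lf j = some lj)
    (hsi : PySem.List.pyGet? st i = some si)
    (hsj : PySem.List.pyGet? st j = none) : pvSwap lf st i j = none := by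
  have h1 := pv_pySet?_eq_some (xs := lf) lj (pv_inRange_of_get ha)
  simp [pvSwap, ha, hlj, hsi, hsj]

-- one unfolding of B's loop when a swap fires: exactly the two inlined tuple swaps
theorem pv_step_swap (lf st : List Int) (i : Int) (hi : i ≠ 0) {a b si sj : Int}
    (ha : PySem.List.pyGet? lf i = some a)
    (hb : PySem.List.pyGet? lf (PySem.Int.floordiv (i - 1) 2) = some b)
    (hab : a < b)
    (hsi : PySem.List.pyGet? st i = some si)
    (hsj : PySem.List.pyGet? st (PySem.Int.floordiv (i - 1) 2) = some sj) :
    pvSiftLoop lf st i =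
      pvSiftLoop (PySem.List.pySetD (PySem.List.pySetD lf i b) (PySem.Int.floordiv (i - 1) 2) a)
        (PySem.List.pySetD (PySem.List.pySetD st i sj) (PySem.Int.floordiv (i - 1) 2) si)
        (PySem.Int.floordiv (i - 1) 2) := by
  rw [pvSiftLoop]
  simp only [dif_neg hi]
  split
  · rename_i heq; rw [ha] at heq; cases heq
  · rename_i li heq1
    rw [ha] at heq1; injection heq1 with e1; subst e1
    split
    · rename_i heq; rw [hb] at heq; cases heq
    · rename_i lj heq2
      rw [hb] at heq2; injection heq2 with e2; subst e2
      rw [dif_pos hab]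
      simp only [hsi, hsj]

-- one unfolding of B's loop when it stops or falls through to the unchanged pair
theorem pv_step_stop (lf st : List Int) (i : Int) (hi : i ≠ 0)
    (h : (∀ a b, PySem.List.pyGet? lf i = some a →
            PySem.List.pyGet? lf (PySem.Int.floordiv (i - 1) 2) = some b →
            a < b → (PySem.List.pyGet? st i = none ∨
                     PySem.List.pyGet? st (PySem.Int.floordiv (i - 1) 2) = none))) :
    pvSiftLoop lf st i = (lf, st) := by
  rw [pvSiftLoop]
  simp only [dif_neg hi]
  split
  · rfl
  · rename_i li heq1
    split
    · rfl
    · rename_i lj heq2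
      by_cases hlt : li < lj
      · rw [dif_pos hlt]
        rcases h li lj heq1 heq2 hlt with hn | hn
        · rw [hn]
        · rw [hn]
          cases PySem.List.pyGet? st i <;> rfl
      · rw [dif_neg hlt]

-- the two ports agree on every input (even where Python would raise, both return the pair unchanged)
theorem pv_ports_eq (len_flat status : List Int) (i : Int) :
    decrease_key len_flat status i = pvSiftLoop len_flat status i := by
  fun_induction decrease_key len_flat status i with
  | case1 lf st =>
      rw [pvSiftLoop]; rfl
  | case2 lf st i hi a b ha hb hab lf' st' hsw ih =>
      cases hsi : PySem.List.pyGet? st i with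
      | none => rw [pv_pvSwap_none_left ha hsi] at hsw; cases hsw
      | some si =>
        cases hsj : PySem.List.pyGet? st (PySem.Int.floordiv (i - 1) 2) with
        | none => rw [pv_pvSwap_none_right ha hb hsi hsj] at hsw; cases hsw
        | some sj =>
          rw [pv_pvSwap_eq_some ha hb hsi hsj] at hsw
          injection hsw with hsw
          injection hsw with hlf hst
          rw [pv_step_swap lf st i hi ha hb hab hsi hsj, hlf, hst]
          exact ih
  | case3 lf st i hi a b ha hb hab hsw =>
      refine (pv_step_stop lf st i hi ?_).symm
      intro a' b' ha' hb' _
      cases hsi : PySem.List.pyGet? st i with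
      | none => exact Or.inl rfl
      | some si =>
        cases hsj : PySem.List.pyGet? st (PySem.Int.floordiv (i - 1) 2) with
        | none => exact Or.inr rfl
        | some sj => rw [pv_pvSwap_eq_some ha hb hsi hsj] at hsw; cases hsw
  | case4 lf st i hi a b ha hb hab =>
      refine (pv_step_stop lf st i hi ?_).symm
      intro a' b' ha' hb' hlt
      rw [ha] at ha'; rw [hb] at hb'
      injection ha' with e1; injection hb' with e2
      subst e1; subst e2
      exact absurd hlt hab
  | case5 lf st i hi hx =>
      refine (pv_step_stop lf st i hi ?_).symm
      intro a b ha hb _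
      exact absurd (hx a b ha hb) not_false

-- ===== VERDICT (by name: the statement is the Claim_ definition above) =====
theorem decrease_key_spec : Claim_equal_decrease_key := by
  intro len_flat status i _ _
  unfold Spec_decrease_key decrease_key_alt
  exact pv_ports_eq len_flat status i
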